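-- pv_equiv track=rewrite | github.com/pabsan-0/learning-rl | random-walk/randomWalk-TDcontrol.py | getReturn
-- ===== SOURCE A (Python) =====
-- def getReturn(history: list) -> list:
--     ''' Compute Gt backwards from a history.
--     Format:  [[state(t), action(t), reward(t+1)],
--               [state[t+1], action(t+1), reward[t+2]],
--                ...]
--     '''
--     # Placeholder, g is of undeterminate size
--     Gt = []
--
--     # Reverse history to start from the last state and go backwards in time
--     aux_hist = history.copy()
--     aux_hist.reverse()
--     for idx, (state, action, reward) in enumerate(aux_hist):
--         # First item considers that rewards after terminal state are 0
--         if idx == 0: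
--             Gt.append(reward)
--         # Else apply Gt = Rt+1 + Gt+1
--         else:
--             Gt.append(reward + Gt[-1])
--
--     # Reverse G so it flows parallel to time & return Gt
--     Gt.reverse()
--     return Gt
-- ===== SOURCE B (Python) =====
-- def getReturn(history: list) -> list:
--     ''' Compute Gt forward: with integer rewards, the return at step i is
--     the total of all rewards minus the rewards collected before step i,
--     so two forward passes (sum, then prefix subtraction) give Gt with no
--     reversal and no backward accumulation. '''
--     rewards = [row[2] for row in history]
--     total = sum(rewards)
--     Gt = []
--     running = 0
--     for r in rewards:
--         Gt.append(total - running)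
--         running += r
--     return Gt
-- ===== Notes on version B (the rewrite author's own statement) =====
-- stated objective: alternative
-- what changed: Replaces A's backward suffix-accumulation over a copied-and-reversed history (with an idx==0 branch, Gt[-1] peeking and a final output reverse) by a forward total-minus-prefix computation: one pass sums all rewards, a second forward pass emits Gt[i] = total - prefix, exact because rewards are integers.
import Mathlib
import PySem

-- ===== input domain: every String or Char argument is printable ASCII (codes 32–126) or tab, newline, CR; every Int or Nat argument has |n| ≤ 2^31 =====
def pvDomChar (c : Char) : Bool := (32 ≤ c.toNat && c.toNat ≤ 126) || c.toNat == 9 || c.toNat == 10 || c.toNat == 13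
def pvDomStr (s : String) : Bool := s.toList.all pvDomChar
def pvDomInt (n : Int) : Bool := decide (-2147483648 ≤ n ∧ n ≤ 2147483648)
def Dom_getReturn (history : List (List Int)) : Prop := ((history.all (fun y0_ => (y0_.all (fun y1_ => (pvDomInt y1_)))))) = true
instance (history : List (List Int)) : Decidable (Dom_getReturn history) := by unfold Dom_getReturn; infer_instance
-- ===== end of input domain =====

-- B replaces A's backward suffix accumulation over reversed history by a forward
-- total-minus-prefix computation (exact for integer rewards); same values, same O(n) cost.

-- reward of a row: Python's row[2] (rows have length 3 under Pre_)
def pvReward (row : List Int) : Int := row.getD 2 0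

-- ===== PORT A =====
-- the loop body: state is (idx, Gt); rows are unpacked (state, action, reward), reward = row[2]
def getReturnStepA (s : Nat × List Int) (row : List Int) : Nat × List Int :=
  if s.1 = 0 then (s.1 + 1, s.2 ++ [pvReward row])
  else (s.1 + 1, s.2 ++ [pvReward row + s.2.getLastD 0])

def getReturn (history : List (List Int)) : List Int :=
  let aux_hist := history.reverse
  let Gt := (aux_hist.foldl getReturnStepA (0, [])).2
  Gt.reverse

-- ===== PORT B =====
-- loop body of the second forward pass: state is (Gt, running)
def getReturnStepB (total : Int) (s : List Int × Int) (r : Int) : List Int × Int :=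
  (s.1 ++ [total - s.2], s.2 + r)

def getReturn_alt (history : List (List Int)) : List Int :=
  let rewards := history.map pvReward
  let total := rewards.foldl (· + ·) 0
  (rewards.foldl (getReturnStepB total) ([], 0)).1

-- ===== PRECONDITION & SPEC =====
-- Pre_ excludes exactly the inputs where Python A raises a ValueError
-- unpacking a row whose length is not 3.
def Pre_getReturn (history : List (List Int)) : Prop :=
  ∀ row ∈ history, row.length = 3
instance (history : List (List Int)) : Decidable (Pre_getReturn history) := by
  unfold Pre_getReturn; infer_instance

def pvWitness_getReturn : List (List Int) := [[0, 1, 5], [1, 0, 3]]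

def Spec_getReturn (history : List (List Int)) (out : List Int) : Prop := out = getReturn_alt history
instance (history : List (List Int)) (out : List Int) : Decidable (Spec_getReturn history out) := by unfold Spec_getReturn; infer_instance

-- ===== CLAIM (what is proved, stated in full; the proofs are below) =====
def Claim_equal_getReturn : Prop := ∀ (history : List (List Int)), Dom_getReturn history → Pre_getReturn history → Spec_getReturn history (getReturn history)

-- ===== LEMMAS AND PROOFS =====

-- cumulative returns over a reversed-order reward list, given running total g
def pvCum (g : Int) : List Int → List Int
  | [] => []
  | r :: rs => (r + g) :: pvCum (r + g) rs

-- B's returns: T - running, over the forward reward list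
def pvBCum (T run : Int) : List Int → List Int
  | [] => []
  | r :: rs => (T - run) :: pvBCum T (run + r) rs

theorem foldA_char (rs : List (List Int)) : ∀ (n : Nat) (Gt : List Int),
    ((rs.foldl getReturnStepA (n + 1, Gt)).2 = Gt ++ pvCum (Gt.getLastD 0) (rs.map pvReward)) := by
  induction rs with
  | nil => intro n Gt; simp [pvCum]
  | cons r rs ih =>
    intro n Gt
    simp only [List.foldl, List.map, pvCum]
    rw [show getReturnStepA (n + 1, Gt) r
          = (n + 2, Gt ++ [pvReward r + Gt.getLastD 0]) by simp [getReturnStepA]]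
    rw [ih (n + 1) (Gt ++ [pvReward r + Gt.getLastD 0])]
    simp

theorem foldB_char (rs : List Int) : ∀ (T run : Int) (acc : List Int),
    ((rs.foldl (getReturnStepB T) (acc, run)).1 = acc ++ pvBCum T run rs) := by
  induction rs with
  | nil => intro T run acc; simp [pvBCum]
  | cons r rs ih =>
    intro T run acc
    simp only [List.foldl, pvBCum, getReturnStepB]
    rw [ih T (run + r) (acc ++ [T - run])]
    simp

theorem foldl_add_sum (rs : List Int) : ∀ (a : Int), rs.foldl (· + ·) a = a + rs.sum := by
  induction rs with
  | nil => intro a; simp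
  | cons r rs ih => intro a; simp only [List.foldl]; rw [ih]; simp [List.sum_cons]; ring

theorem pvCum_append (xs : List Int) (x : Int) : ∀ (g : Int),
    pvCum g (xs ++ [x]) = pvCum g xs ++ [x + (pvCum g xs).getLastD g] := by
  induction xs with
  | nil => intro g; simp [pvCum]
  | cons y ys ih =>
    intro g
    simp only [List.cons_append, pvCum, ih (y + g)]
    simp only [List.getLastD_cons]

theorem pvCum_getLastD (xs : List Int) : ∀ (g : Int),
    (pvCum g xs).getLastD g = g + xs.sum := by
  induction xs with
  | nil => intro g; simp [pvCum]
  | cons y ys ih =>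
    intro g
    simp only [pvCum, List.getLastD_cons, ih (y + g), List.sum_cons]
    ring

-- bridge: the reversed backward cumulative list equals B's forward total-minus-prefix list
theorem bridge (rs : List Int) : ∀ (g run : Int),
    (pvCum g rs.reverse).reverse = pvBCum (run + g + rs.sum) run rs := by
  induction rs with
  | nil => intro g run; simp [pvCum, pvBCum]
  | cons r rs ih =>
    intro g run
    simp only [List.reverse_cons, pvCum_append, pvCum_getLastD, List.sum_reverse,
      List.reverse_append, List.reverse_cons, List.reverse_nil, List.nil_append,
      List.singleton_append, pvBCum, List.sum_cons]
    rw [show r + (g + rs.sum) = run + g + (r + rs.sum) - run from by ring,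
        ih g (run + r),
        show run + r + g + rs.sum = run + g + (r + rs.sum) from by ring]

-- A's result in forward cumulative form
theorem A_char (history : List (List Int)) :
    getReturn history = (pvCum 0 (history.map pvReward).reverse).reverse := by
  unfold getReturn
  rw [← List.map_reverse]
  cases h : history.reverse with
  | nil => simp [pvCum]
  | cons r rs =>
    simp only [List.foldl, List.map]
    rw [show getReturnStepA (0, []) r = (1, [pvReward r]) by simp [getReturnStepA]]
    rw [show (1 : Nat) = 0 + 1 from rfl, foldA_char rs 0 [pvReward r]]
    simp [pvCum]

-- ===== VERDICT (by name: the statement is the Claim_ definition above) =====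
theorem getReturn_spec : Claim_equal_getReturn := by
  intro history _ _
  unfold Spec_getReturn getReturn_alt
  rw [A_char, foldB_char, foldl_add_sum, bridge ((history.map pvReward)) 0 0]
  simp
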